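-- pv_equiv track=rewrite | github.com/gkamer8/baseball-team-value | get_full_team_data.py | append_contracts
-- ===== SOURCE A (Python) =====
-- def append_contracts(lst, srv):
--     srv += len(lst)
--     while srv < 3:
--         lst.append((None, None, 'pre-arb'))
--         srv += 1
--     while srv < 6:
--         lst.append((None, None, 'arb'))
--         srv += 1
--     return lst
-- ===== SOURCE B (Python) =====
-- def append_contracts(lst, srv):
--     start = srv + len(lst)
--     pre = max(0, 3 - start)
--     arb = max(0, 6 - max(start, 3))
--     lst.extend([(None, None, 'pre-arb')] * pre + [(None, None, 'arb')] * arb)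
--     return lst
-- ===== Notes on version B (the rewrite author's own statement) =====
-- stated objective: simpler
-- what changed: Replaced the two counting while-loops with a closed-form computation of the pre-arb and arb pad counts and a single in-place extend.
import Mathlib
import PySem

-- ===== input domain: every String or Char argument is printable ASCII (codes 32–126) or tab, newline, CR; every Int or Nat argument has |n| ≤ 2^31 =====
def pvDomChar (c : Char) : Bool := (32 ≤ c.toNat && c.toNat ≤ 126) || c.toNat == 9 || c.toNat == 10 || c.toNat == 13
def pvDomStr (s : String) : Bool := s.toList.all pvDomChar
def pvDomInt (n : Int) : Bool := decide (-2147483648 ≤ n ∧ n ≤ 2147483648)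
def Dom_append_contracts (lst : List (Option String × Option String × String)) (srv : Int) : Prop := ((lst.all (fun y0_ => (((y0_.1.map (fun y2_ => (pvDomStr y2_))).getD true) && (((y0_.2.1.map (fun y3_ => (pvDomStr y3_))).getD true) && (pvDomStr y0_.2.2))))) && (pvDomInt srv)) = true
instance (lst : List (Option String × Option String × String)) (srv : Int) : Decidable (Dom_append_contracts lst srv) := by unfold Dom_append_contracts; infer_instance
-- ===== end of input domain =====

-- B replaces A's two counting while-loops by closed-form pad counts and one extend (simpler); both mutate lst in Python, equivalence is about the return value.


-- ===== PORT A =====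
-- while srv < 3: lst.append((None, None, 'pre-arb')); srv += 1
def appendLoopPre (lst : List (Option String × Option String × String)) (srv : Int) :
    List (Option String × Option String × String) × Int :=
  if srv < 3 then appendLoopPre (lst ++ [(none, none, "pre-arb")]) (srv + 1) else (lst, srv)
  termination_by (3 - srv).toNat
  decreasing_by omega

-- while srv < 6: lst.append((None, None, 'arb')); srv += 1
def appendLoopArb (lst : List (Option String × Option String × String)) (srv : Int) :
    List (Option String × Option String × String) × Int :=
  if srv < 6 then appendLoopArb (lst ++ [(none, none, "arb")]) (srv + 1) else (lst, srv)
  termination_by (6 - srv).toNat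
  decreasing_by omega

def append_contracts (lst : List (Option String × Option String × String)) (srv : Int) : List (Option String × Option String × String) :=
  let srv := srv + lst.length
  let p := appendLoopPre lst srv
  let q := appendLoopArb p.1 p.2
  q.1

-- ===== PORT B =====
def append_contracts_alt (lst : List (Option String × Option String × String)) (srv : Int) : List (Option String × Option String × String) :=
  let start := srv + lst.length
  let pre := max 0 (3 - start)
  let arb := max 0 (6 - max start 3)
  lst ++ (List.replicate pre.toNat (none, none, "pre-arb") ++ List.replicate arb.toNat (none, none, "arb"))

-- ===== PRECONDITION & SPEC =====
def Spec_append_contracts (lst : List (Option String × Option String × String)) (srv : Int) (out : List (Option String × Option String × String)) : Prop := out = append_contracts_alt lst srv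
instance (lst : List (Option String × Option String × String)) (srv : Int) (out : List (Option String × Option String × String)) : Decidable (Spec_append_contracts lst srv out) := by unfold Spec_append_contracts; infer_instance

-- ===== CLAIM (what is proved, stated in full; the proofs are below) =====
def Claim_equal_append_contracts : Prop := ∀ (lst : List (Option String × Option String × String)) (srv : Int), Dom_append_contracts lst srv → Spec_append_contracts lst srv (append_contracts lst srv)

-- ===== LEMMAS AND PROOFS =====
theorem appendLoopPre_eq (n : Nat) : ∀ (srv : Int) (lst : List (Option String × Option String × String)),
    (3 - srv).toNat = n →
    appendLoopPre lst srv = (lst ++ List.replicate n (none, none, "pre-arb"), max srv 3) := by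
  induction n with
  | zero =>
    intro srv lst h
    rw [appendLoopPre]
    have : ¬ srv < 3 := by omega
    simp [this]
    omega
  | succ k ih =>
    intro srv lst h
    rw [appendLoopPre]
    have hlt : srv < 3 := by omega
    simp only [hlt, if_true]
    rw [ih (srv + 1) _ (by omega)]
    have : max (srv + 1) 3 = max srv 3 := by omega
    rw [this, List.append_assoc]
    simp [List.replicate_succ]

theorem appendLoopArb_eq (n : Nat) : ∀ (srv : Int) (lst : List (Option String × Option String × String)),
    (6 - srv).toNat = n →
    appendLoopArb lst srv = (lst ++ List.replicate n (none, none, "arb"), max srv 6) := by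
  induction n with
  | zero =>
    intro srv lst h
    rw [appendLoopArb]
    have : ¬ srv < 6 := by omega
    simp [this]
    omega
  | succ k ih =>
    intro srv lst h
    rw [appendLoopArb]
    have hlt : srv < 6 := by omega
    simp only [hlt, if_true]
    rw [ih (srv + 1) _ (by omega)]
    have : max (srv + 1) 6 = max srv 6 := by omega
    rw [this, List.append_assoc]
    simp [List.replicate_succ]

-- ===== VERDICT (by name: the statement is the Claim_ definition above) =====
theorem append_contracts_spec : Claim_equal_append_contracts := by
  intro lst srv _
  unfold Spec_append_contracts append_contracts append_contracts_alt
  simp only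
  rw [appendLoopPre_eq (3 - (srv + lst.length)).toNat _ _ rfl,
      appendLoopArb_eq (6 - max (srv + lst.length) 3).toNat _ _ (by omega)]
  simp only [List.append_assoc]
  have h1 : (3 - (srv + (lst.length : Int))).toNat = (max 0 (3 - (srv + lst.length))).toNat := by omega
  have h2 : (6 - max (srv + (lst.length : Int)) 3).toNat = (max 0 (6 - max (srv + lst.length) 3)).toNat := by omega
  rw [h1, h2]
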